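-- pv_equiv track=rewrite | github.com/Luzog78/Advent-of-Code | 2023/src/day-07-2.py | check_n_of_a_kind
-- ===== SOURCE A (Python) =====
-- types = "J23456789TQKA"
--
-- def check_n_of_a_kind(hand, n):
-- 	presents = []
-- 	for type in types:
-- 		count = 0
-- 		J_used = 0
-- 		if type != 'J':
-- 			for card in hand[0]:
-- 				if card == type:
-- 					count += 1
-- 		if count < n:
-- 			for card in hand[0]:
-- 				if card == 'J':
-- 					J_used += 1
-- 					count += 1
-- 					if count == n:
-- 						break
-- 		if count >= n:
-- 			presents.append((type, J_used))
-- 	return presents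
-- ===== SOURCE B (Python) =====
-- types = "J23456789TQKA"
--
-- def check_n_of_a_kind(hand, n):
--     # One prebuilt count table + single arithmetic pass (no per-type rescans).
--     counts = {}
--     for card in hand[0]:
--         counts[card] = counts.get(card, 0) + 1
--     J = counts.get('J', 0)
--     presents = []
--     for type in types:
--         base = 0 if type == 'J' else counts.get(type, 0)
--         if base >= n:
--             presents.append((type, 0))
--         elif base + J >= n:
--             presents.append((type, n - base))
--     return presents
-- ===== Notes on version B (the rewrite author's own statement) =====
-- stated objective: simpler
-- what changed: Builds a character-count table once and replaces A's per-type rescans of the hand and the incremental joker loop with one arithmetic pass over the fixed types string (base >= n, else base + jokers >= n with J_used = n - base).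
import Mathlib
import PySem

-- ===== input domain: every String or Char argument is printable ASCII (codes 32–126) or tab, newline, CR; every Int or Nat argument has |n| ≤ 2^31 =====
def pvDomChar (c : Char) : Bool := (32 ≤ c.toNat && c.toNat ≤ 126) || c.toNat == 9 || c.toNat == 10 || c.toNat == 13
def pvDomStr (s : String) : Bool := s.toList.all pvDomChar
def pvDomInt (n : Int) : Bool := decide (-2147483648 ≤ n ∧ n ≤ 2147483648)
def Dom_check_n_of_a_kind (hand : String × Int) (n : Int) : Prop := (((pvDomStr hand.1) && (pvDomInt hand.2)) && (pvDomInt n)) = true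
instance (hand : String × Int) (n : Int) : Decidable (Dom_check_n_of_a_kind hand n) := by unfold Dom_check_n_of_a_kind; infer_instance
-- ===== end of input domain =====

-- B replaces A's per-type rescans and incremental joker loop with one prebuilt count
-- table and a single arithmetic pass (objective: simpler).

-- ===== PORT A =====
def pvTypes : List Char := "J23456789TQKA".toList

-- the 'for card in hand[0]: if card == 'J': J_used += 1; count += 1; if count == n: break' loop
def pvJLoop (cs : List Char) (count J_used n : Int) : Int × Int :=
  match cs with
  | [] => (count, J_used)
  | c :: rest =>
    if c == 'J' then
      if count + 1 = n then (count + 1, J_used + 1)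
      else pvJLoop rest (count + 1) (J_used + 1) n
    else pvJLoop rest count J_used n

def check_n_of_a_kind (hand : String × Int) (n : Int) : List (String × Int) :=
  pvTypes.foldl (fun presents t =>
    let count : Int :=
      if t ≠ 'J' then
        hand.1.toList.foldl (fun c card => if card == t then c + 1 else c) 0
      else 0
    let (count, J_used) := if count < n then pvJLoop hand.1.toList count 0 n else (count, (0 : Int))
    if count ≥ n then presents ++ [(String.singleton t, J_used)] else presents) []

-- ===== PORT B =====
def check_n_of_a_kind_alt (hand : String × Int) (n : Int) : List (String × Int) :=
  let counts := hand.1.toList.foldl (fun d x => d.insert x (d.getD x 0 + 1)) (PySem.Dict.empty : PySem.Dict Char Int)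
  let J := counts.getD 'J' 0
  pvTypes.foldl (fun presents t =>
    let base : Int := if t = 'J' then 0 else counts.getD t 0
    if base ≥ n then presents ++ [(String.singleton t, (0 : Int))]
    else if base + J ≥ n then presents ++ [(String.singleton t, n - base)]
    else presents) []

-- ===== PRECONDITION & SPEC =====
def Spec_check_n_of_a_kind (hand : String × Int) (n : Int) (out : List (String × Int)) : Prop := out = check_n_of_a_kind_alt hand n
instance (hand : String × Int) (n : Int) (out : List (String × Int)) : Decidable (Spec_check_n_of_a_kind hand n out) := by unfold Spec_check_n_of_a_kind; infer_instance

-- ===== CLAIM (what is proved, stated in full; the proofs are below) =====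
def Claim_equal_check_n_of_a_kind : Prop := ∀ (hand : String × Int) (n : Int), Dom_check_n_of_a_kind hand n → Spec_check_n_of_a_kind hand n (check_n_of_a_kind hand n)

-- ===== LEMMAS AND PROOFS =====

-- characterisation of A's joker loop
theorem pvJLoop_eq (cs : List Char) (count J_used n : Int) (h : count < n) :
    pvJLoop cs count J_used n =
      if count + (cs.count 'J' : Int) ≥ n then (n, J_used + (n - count))
      else (count + (cs.count 'J' : Int), J_used + (cs.count 'J' : Int)) := by
  induction cs generalizing count J_used with
  | nil => simp [pvJLoop]; omega
  | cons c rest ih =>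
    by_cases hc : (c == 'J') = true
    · have hcnt : List.count 'J' (c :: rest) = List.count 'J' rest + 1 := by
        simp [List.count_cons, hc]
      rw [hcnt]
      simp only [pvJLoop, hc, if_true]
      push_cast
      by_cases hn : count + 1 = n
      · rw [if_pos hn,
          if_pos (show count + ((rest.count 'J' : Int) + 1) ≥ n by omega), Prod.mk.injEq]
        exact ⟨by omega, by omega⟩
      · rw [if_neg hn, ih _ _ (by omega)]
        have hiff : (count + 1 + (rest.count 'J' : Int) ≥ n)
            ↔ (count + ((rest.count 'J' : Int) + 1) ≥ n) := by omega
        by_cases hx : count + 1 + (rest.count 'J' : Int) ≥ n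
        · rw [if_pos hx, if_pos (hiff.mp hx), Prod.mk.injEq]
          exact ⟨rfl, by omega⟩
        · rw [if_neg hx, if_neg (fun hy => hx (hiff.mpr hy)), Prod.mk.injEq]
          exact ⟨by omega, by omega⟩
    · have hcnt : List.count 'J' (c :: rest) = List.count 'J' rest := by
        simp [List.count_cons, hc]
      rw [hcnt]
      simp only [pvJLoop, hc, Bool.false_eq_true, if_false]
      exact ih _ _ h

-- the two per-type loop bodies agree
theorem pvStep_eq (L : List Char) (n : Int) (acc : List (String × Int)) (t : Char) :
    (let count : Int :=
        if t ≠ 'J' then L.foldl (fun c card => if card == t then c + 1 else c) 0 else 0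
      let (count, J_used) := if count < n then pvJLoop L count 0 n else (count, (0 : Int))
      if count ≥ n then acc ++ [(String.singleton t, J_used)] else acc) =
    (let base : Int := if t = 'J' then 0 else (L.count t : Int)
      if base ≥ n then acc ++ [(String.singleton t, (0 : Int))]
      else if base + (L.count 'J' : Int) ≥ n then acc ++ [(String.singleton t, n - base)]
      else acc) := by
  have hcount : L.foldl (fun c card => if card == t then c + 1 else c) 0 = (L.count t : Int) := by
    rw [PySem.List.foldl_beq_add_one]; omega
  have hb : (if t ≠ 'J' then L.foldl (fun c card => if card == t then c + 1 else c) 0 else 0)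
      = (if t = 'J' then 0 else (L.count t : Int)) := by
    by_cases h : t = 'J'
    · simp [h]
    · rw [if_pos h, hcount, if_neg h]
  simp only [hb]
  set B : Int := if t = 'J' then 0 else (L.count t : Int) with hB
  set cj : Int := (L.count 'J' : Int) with hcj
  rcases hP : (if B < n then pvJLoop L B 0 n else (B, (0 : Int))) with ⟨cnt, ju⟩
  show (if cnt ≥ n then acc ++ [(String.singleton t, ju)] else acc) = _
  by_cases h1 : B < n
  · rw [if_pos h1, pvJLoop_eq L B 0 n h1, ← hcj] at hP
    by_cases h2 : B + cj ≥ n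
    · rw [if_pos h2] at hP
      injection hP with e1 e2
      subst e1; subst e2
      split_ifs <;> first | rfl | omega | norm_num
    · rw [if_neg h2] at hP
      injection hP with e1 e2
      subst e1; subst e2
      split_ifs <;> first | rfl | omega
  · rw [if_neg h1] at hP
    injection hP with e1 e2
    subst e1; subst e2
    split_ifs <;> first | rfl | omega

-- ===== VERDICT (by name: the statement is the Claim_ definition above) =====
theorem check_n_of_a_kind_spec : Claim_equal_check_n_of_a_kind := by
  intro hand n _
  unfold Spec_check_n_of_a_kind check_n_of_a_kind check_n_of_a_kind_alt
  simp only [PySem.Dict.getD_foldl_insert_add_one, PySem.Dict.getD_empty, zero_add]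
  apply PySem.List.foldl_congr_mem
  intro acc t _
  exact pvStep_eq hand.1.toList n acc t
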